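-- pv_equiv track=rewrite | github.com/sm783-droid/Football-simulator | simulation.py | make_fixtures
-- ===== SOURCE A (Python) =====
-- def make_fixtures(team_ids):
--     """
--     Full home-and-away round-robin (Berger table).
--     Returns [(game_week, home_id, away_id), ...]
--     10 teams → 90 fixtures over 18 weeks, 5 per week.
--     """
--     teams = list(team_ids)
--     if len(teams) % 2:
--         teams.append(None)          # bye slot for odd counts
--     n, half = len(teams), len(teams) // 2
--     first_leg = []
--     for rnd in range(n - 1):
--         for i in range(half):
--             h, a = teams[i], teams[n - 1 - i]
--             if h and a:
--                 first_leg.append((rnd + 1, h, a))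
--         teams = [teams[0]] + [teams[-1]] + teams[1:-1]   # rotate except first
--     return_leg = [(w + (n - 1), a, h) for w, h, a in first_leg]
--     return first_leg + return_leg
-- ===== SOURCE B (Python) =====
-- def make_fixtures(team_ids):
--     """Berger-table round robin via closed-form modular slot lookup (no list rotation)."""
--     teams = list(team_ids)
--     if len(teams) % 2:
--         teams.append(None)
--     n, half = len(teams), len(teams) // 2
--     m = n - 1
--
--     def at_slot(rnd, p):
--         return teams[0] if p == 0 else teams[(p - 1 - rnd) % m + 1]
--
--     first_leg = [(rnd + 1, h, a)
--                  for rnd in range(m)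
--                  for i in range(half)
--                  for h, a in [(at_slot(rnd, i), at_slot(rnd, n - 1 - i))]
--                  if h and a]
--     return first_leg + [(w + m, a, h) for w, h, a in first_leg]
-- ===== Notes on version B (the rewrite author's own statement) =====
-- stated objective: alternative
-- what changed: B removes A's per-round rotation of a maintained teams list and instead reads each round's slot directly from the original padded list with a closed-form modular index ((p-1-rnd) % (n-1) + 1, slot 0 fixed), building the first leg as one flat comprehension.
import Mathlib
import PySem

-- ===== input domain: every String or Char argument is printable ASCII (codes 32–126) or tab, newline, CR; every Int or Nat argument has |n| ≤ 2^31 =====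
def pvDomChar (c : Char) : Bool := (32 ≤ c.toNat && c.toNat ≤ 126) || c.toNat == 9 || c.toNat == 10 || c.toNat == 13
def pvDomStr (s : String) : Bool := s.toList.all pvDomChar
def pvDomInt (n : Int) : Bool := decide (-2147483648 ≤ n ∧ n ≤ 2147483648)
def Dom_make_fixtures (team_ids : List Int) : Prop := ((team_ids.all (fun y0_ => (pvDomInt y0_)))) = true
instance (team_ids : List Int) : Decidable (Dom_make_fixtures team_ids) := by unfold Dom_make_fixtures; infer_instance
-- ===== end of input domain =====

-- B replaces A's per-round list rotation by a closed-form modular slot lookup into the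
-- original (padded) team list; objective: alternative (same output, different representation).

-- ===== PORT A =====
-- Python truthiness of a team slot: None and id 0 are falsy ('if h and a').
def pvTruthy (o : Option Int) : Bool := match o with | none => false | some x => x != 0

-- teams[i]: every index A actually evaluates is in range (proved facts below), so getD is exact.
def pvGetA (ts : List (Option Int)) (i : Int) : Option Int := (PySem.List.pyGet? ts i).getD none

-- teams = [teams[0]] + [teams[-1]] + teams[1:-1]; only executed with len(teams) ≥ 2, where
-- pyGet?.toList is exactly the singleton Python builds.
def pvRotA (ts : List (Option Int)) : List (Option Int) :=
  (PySem.List.pyGet? ts 0).toList ++ (PySem.List.pyGet? ts (-1)).toList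
    ++ PySem.List.slice ts (some 1) (some (-1))

-- inner 'for i in range(half)' loop appending to first_leg
def pvRowA (teams : List (Option Int)) (n rnd half : Int) (acc : List (Int × Int × Int)) :
    List (Int × Int × Int) :=
  (PySem.List.pyRange 0 half 1).foldl (fun acc i =>
    if pvTruthy (pvGetA teams i) && pvTruthy (pvGetA teams (n - 1 - i)) then
      acc ++ [(rnd + 1, (pvGetA teams i).getD 0, (pvGetA teams (n - 1 - i)).getD 0)]
    else acc) acc

def make_fixtures (team_ids : List Int) : List (Int × Int × Int) :=
  let teams : List (Option Int) := team_ids.map some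
  let teams := if teams.length % 2 == 1 then teams ++ [none] else teams
  let n : Int := teams.length
  let half : Int := PySem.Int.floordiv n 2
  let st := (PySem.List.pyRange 0 (n - 1) 1).foldl
      (fun (st : List (Option Int) × List (Int × Int × Int)) rnd =>
        (pvRotA st.1, pvRowA st.1 n rnd half st.2)) (teams, [])
  let first_leg := st.2
  first_leg ++ first_leg.map (fun wha => (wha.1 + (n - 1), wha.2.2, wha.2.1))

-- ===== PORT B =====
-- closed-form slot lookup: slot 0 is fixed, slot p ≥ 1 holds teams[(p-1-rnd) % (n-1) + 1]
def pvAtSlot (teams : List (Option Int)) (m rnd p : Int) : Option Int :=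
  if p = 0 then (PySem.List.pyGet? teams 0).getD none
  else (PySem.List.pyGet? teams (PySem.Int.mod (p - 1 - rnd) m + 1)).getD none

def make_fixtures_alt (team_ids : List Int) : List (Int × Int × Int) :=
  let teams : List (Option Int) := team_ids.map some
  let teams := if teams.length % 2 == 1 then teams ++ [none] else teams
  let n : Int := teams.length
  let half : Int := PySem.Int.floordiv n 2
  let m : Int := n - 1
  let first_leg := (PySem.List.pyRange 0 m 1).flatMap (fun rnd =>
    (PySem.List.pyRange 0 half 1).filterMap (fun i =>
      if pvTruthy (pvAtSlot teams m rnd i) && pvTruthy (pvAtSlot teams m rnd (n - 1 - i)) then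
        some (rnd + 1, (pvAtSlot teams m rnd i).getD 0, (pvAtSlot teams m rnd (n - 1 - i)).getD 0)
      else none))
  first_leg ++ first_leg.map (fun wha => (wha.1 + m, wha.2.2, wha.2.1))

-- ===== PRECONDITION & SPEC =====
def Spec_make_fixtures (team_ids : List Int) (out : List (Int × Int × Int)) : Prop := out = make_fixtures_alt team_ids
instance (team_ids : List Int) (out : List (Int × Int × Int)) : Decidable (Spec_make_fixtures team_ids out) := by unfold Spec_make_fixtures; infer_instance

-- ===== CLAIM (what is proved, stated in full; the proofs are below) =====
def Claim_equal_make_fixtures : Prop := ∀ (team_ids : List Int), Dom_make_fixtures team_ids → Spec_make_fixtures team_ids (make_fixtures team_ids)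

-- ===== LEMMAS AND PROOFS =====

theorem pvRotA_eq (ts : List (Option Int)) (hn : 2 ≤ ts.length) :
    pvRotA ts = ts.head?.toList ++ ts.getLast?.toList ++ (ts.drop 1).take (ts.length - 2) := by
  have h0 : 0 < ts.length := by omega
  have hne : ts ≠ [] := by simpa [← List.length_pos_iff] using h0
  have hml : -(ts.length:Int) ≤ -1 := by omega
  have hc1 : ¬ ((ts.length:Int) + -1 < 0) := by omega
  simp [pvRotA, PySem.List.pyGet?, PySem.List.pyIdx?, PySem.List.slice, PySem.List.clampIdx,
    h0, hml, hc1]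
  simp [List.head?_eq_getElem?, List.getLast?_eq_getElem?]
  rw [List.getElem?_eq_getElem h0, List.getElem?_eq_getElem (by omega : ts.length - 1 < ts.length)]
  have hmin : min 1 ts.length = 1 := by omega
  have ht : ((ts.length:Int) + -1).toNat - 1 = ts.length - 2 := by omega
  simp [hmin, ht, List.drop_one]
theorem pvRotA_length (ts : List (Option Int)) (hn : 2 ≤ ts.length) :
    (pvRotA ts).length = ts.length := by
  have h0 : 0 < ts.length := by omega
  have hne : ts ≠ [] := by simpa [← List.length_pos_iff] using h0
  have hh : ts.head?.toList = [ts[0]] := by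
    rw [List.head?_eq_getElem?, List.getElem?_eq_getElem h0]; rfl
  have hl : ts.getLast?.toList = [ts[ts.length - 1]] := by
    rw [List.getLast?_eq_getElem?, List.getElem?_eq_getElem (by omega : ts.length - 1 < ts.length)]; rfl
  rw [pvRotA_eq ts hn, hh, hl]
  simp
  omega

theorem pvRotA_get (ts : List (Option Int)) (hn : 2 ≤ ts.length) (p : Nat) (hp : p < ts.length) :
    (pvRotA ts)[p]? = if p = 0 then ts[0]? else if p = 1 then ts[ts.length - 1]? else ts[p - 1]? := by
  have h0 : 0 < ts.length := by omega
  have hne : ts ≠ [] := by simpa [← List.length_pos_iff] using h0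
  have hh : ts.head?.toList = [ts[0]] := by
    rw [List.head?_eq_getElem?, List.getElem?_eq_getElem h0]; rfl
  have hl : ts.getLast?.toList = [ts[ts.length - 1]] := by
    rw [List.getLast?_eq_getElem?, List.getElem?_eq_getElem (by omega : ts.length - 1 < ts.length)]; rfl
  rw [pvRotA_eq ts hn, hh, hl]
  match p, hp with
  | 0, _ => simp [List.getElem?_eq_getElem h0]
  | 1, _ => simp [List.getElem?_eq_getElem (by omega : ts.length - 1 < ts.length)]
  | (q+2), hp =>
    have hq : q < ts.length - 2 := by omega
    simp [hq]
theorem pvIter_length (T : List (Option Int)) (hn : 2 ≤ T.length) (k : Nat) :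
    (pvRotA^[k] T).length = T.length := by
  induction k with
  | zero => rfl
  | succ k ih => rw [Function.iterate_succ_apply', pvRotA_length _ (by omega), ih]

theorem pvMod_shift (a b m : Int) (hm : 0 < m) (h : a - b = m ∨ b - a = m ∨ a = b) :
    PySem.Int.mod a m = PySem.Int.mod b m := by
  rw [PySem.Int.mod_eq_emod_of_pos hm, PySem.Int.mod_eq_emod_of_pos hm]
  rcases h with h | h | h
  · rw [show a = b + 1 * m by omega, Int.add_mul_emod_self_right]
  · rw [show b = a + 1 * m by omega, Int.add_mul_emod_self_right]
  · rw [h]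
theorem pvGetA_eq_getElem? (L : List (Option Int)) (p : Int) (h0 : 0 ≤ p) :
    pvGetA L p = (L[p.toNat]?).getD none := by
  unfold pvGetA; rw [PySem.List.pyGet?_of_nonneg _ h0]

theorem pvIter_get (T : List (Option Int)) (hn : 2 ≤ T.length) (k : Nat) :
    ∀ p : Int, 0 ≤ p → p < (T.length : Int) →
    pvGetA (pvRotA^[k] T) p = pvAtSlot T ((T.length : Int) - 1) (k : Int) p := by
  have hm : (0:Int) < (T.length : Int) - 1 := by omega
  induction k with
  | zero =>
    intro p h0 hp
    rw [Function.iterate_zero_apply, pvGetA_eq_getElem? _ p h0]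
    unfold pvAtSlot
    by_cases hp0 : p = 0
    · subst hp0; simp [PySem.List.pyGet?_zero]
    · rw [if_neg hp0]
      have hmod : PySem.Int.mod (p - 1 - ((0:Nat):Int)) ((T.length:Int) - 1) + 1 = p := by
        rw [PySem.Int.mod_eq_emod_of_pos hm,
            show p - 1 - ((0:Nat):Int) = p - 1 by push_cast; ring,
            Int.emod_eq_of_lt (by omega) (by omega)]
        ring
      rw [hmod, PySem.List.pyGet?_of_nonneg _ h0]
  | succ k ih =>
    intro p h0 hp
    have hL : (pvRotA^[k] T).length = T.length := pvIter_length T hn k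
    rw [Function.iterate_succ_apply', pvGetA_eq_getElem? _ p h0,
        pvRotA_get _ (by omega) p.toNat (by omega), hL]
    by_cases hp0 : p = 0
    · have ht : p.toNat = 0 := by omega
      simp only [ht, reduceIte]
      have hIH := ih 0 le_rfl (by omega)
      rw [pvGetA_eq_getElem? _ 0 le_rfl] at hIH
      simp only [Int.toNat_zero] at hIH
      rw [hIH]
      subst hp0
      unfold pvAtSlot
      simp
    · by_cases hp1 : p = 1
      · have ht : p.toNat = 1 := by omega
        rw [ht, if_neg (by omega : ¬ (1:Nat) = 0), if_pos rfl]
        have hIH := ih ((T.length : Int) - 1) (by omega) (by omega)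
        rw [pvGetA_eq_getElem? _ _ (by omega : (0:Int) ≤ (T.length : Int) - 1),
            show ((T.length : Int) - 1).toNat = T.length - 1 by omega] at hIH
        rw [hIH]
        subst hp1
        unfold pvAtSlot
        rw [if_neg (by omega : ¬ ((T.length : Int) - 1) = 0), if_neg (by omega : ¬ (1:Int) = 0)]
        rw [pvMod_shift ((T.length : Int) - 1 - 1 - (k:Int)) (1 - 1 - ((k+1:Nat):Int))
              ((T.length : Int) - 1) hm (by left; push_cast; ring)]
      · have ht2 : 2 ≤ p.toNat := by omega
        rw [if_neg (by omega : ¬ p.toNat = 0), if_neg (by omega : ¬ p.toNat = 1)]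
        have hIH := ih (p - 1) (by omega) (by omega)
        rw [pvGetA_eq_getElem? _ _ (by omega : (0:Int) ≤ p - 1),
            show (p - 1).toNat = p.toNat - 1 by omega] at hIH
        rw [hIH]
        unfold pvAtSlot
        rw [if_neg (by omega : ¬ (p - 1) = 0), if_neg hp0]
        rw [pvMod_shift (p - 1 - 1 - (k:Int)) (p - 1 - ((k+1:Nat):Int))
              ((T.length : Int) - 1) hm (by right; right; push_cast; ring)]
theorem pvFilterMap {α : Type} (l : List Int) (p : Int → Bool) (f : Int → α) :
    (l.filter p).map f = l.filterMap (fun x => if p x then some (f x) else none) := by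
  induction l with
  | nil => rfl
  | cons x xs ih => by_cases h : p x <;> simp [h, ih]

theorem pvRow_eq (T : List (Option Int)) (hn : 2 ≤ T.length) (k : Nat)
    (acc : List (Int × Int × Int)) :
    pvRowA (pvRotA^[k] T) (T.length : Int) (k : Int) (PySem.Int.floordiv (T.length : Int) 2) acc
      = acc ++ (PySem.List.pyRange 0 (PySem.Int.floordiv (T.length : Int) 2) 1).filterMap (fun i =>
          if pvTruthy (pvAtSlot T ((T.length : Int) - 1) (k : Int) i)
              && pvTruthy (pvAtSlot T ((T.length : Int) - 1) (k : Int) ((T.length : Int) - 1 - i)) then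
            some ((k : Int) + 1, (pvAtSlot T ((T.length : Int) - 1) (k : Int) i).getD 0,
                  (pvAtSlot T ((T.length : Int) - 1) (k : Int) ((T.length : Int) - 1 - i)).getD 0)
          else none) := by
  have hdiv : PySem.Int.floordiv ((T.length : Int)) 2 = (T.length : Int) / 2 :=
    PySem.Int.floordiv_eq_ediv_of_pos (by omega)
  unfold pvRowA
  rw [PySem.List.foldl_append_if, pvFilterMap]
  congr 1
  apply List.filterMap_congr
  intro i hi
  have hib := (PySem.List.mem_pyRange_one).1 hi
  rw [hdiv] at hib
  have h1a : (0:Int) ≤ i := hib.1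
  have h1b : i < (T.length : Int) := by omega
  have h2a : (0:Int) ≤ (T.length : Int) - 1 - i := by omega
  have h2b : (T.length : Int) - 1 - i < (T.length : Int) := by omega
  rw [pvIter_get T hn k i h1a h1b, pvIter_get T hn k _ h2a h2b]
theorem pvLoop_eq (T : List (Option Int)) (hn : 2 ≤ T.length) :
    ∀ (d j : Nat), T.length - 1 - j = d → j ≤ T.length - 1 →
    ∀ (acc : List (Int × Int × Int)),
    ((PySem.List.pyRange (j : Int) ((T.length : Int) - 1) 1).foldl
        (fun (st : List (Option Int) × List (Int × Int × Int)) rnd =>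
          (pvRotA st.1, pvRowA st.1 (T.length : Int) rnd (PySem.Int.floordiv (T.length : Int) 2) st.2))
        (pvRotA^[j] T, acc)).2
      = acc ++ (PySem.List.pyRange (j : Int) ((T.length : Int) - 1) 1).flatMap (fun rnd =>
          (PySem.List.pyRange 0 (PySem.Int.floordiv (T.length : Int) 2) 1).filterMap (fun i =>
            if pvTruthy (pvAtSlot T ((T.length : Int) - 1) rnd i)
                && pvTruthy (pvAtSlot T ((T.length : Int) - 1) rnd ((T.length : Int) - 1 - i)) then
              some (rnd + 1, (pvAtSlot T ((T.length : Int) - 1) rnd i).getD 0,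
                    (pvAtSlot T ((T.length : Int) - 1) rnd ((T.length : Int) - 1 - i)).getD 0)
            else none)) := by
  intro d
  induction d with
  | zero =>
    intro j hd hj acc
    have hje : (T.length : Int) - 1 ≤ (j : Int) := by omega
    rw [PySem.List.pyRange_one_eq_nil hje]
    simp
  | succ d ih =>
    intro j hd hj acc
    have hjlt : (j : Int) < (T.length : Int) - 1 := by omega
    rw [PySem.List.pyRange_one_cons hjlt]
    simp only [List.foldl_cons, List.flatMap_cons]
    rw [show ((j : Int) + 1) = ((j + 1 : Nat) : Int) by push_cast; ring]
    have hstep : (pvRotA (pvRotA^[j] T), pvRowA (pvRotA^[j] T) (T.length : Int) (j : Int)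
        (PySem.Int.floordiv (T.length : Int) 2) acc)
        = (pvRotA^[j+1] T, acc ++ (PySem.List.pyRange 0 (PySem.Int.floordiv (T.length : Int) 2) 1).filterMap (fun i =>
            if pvTruthy (pvAtSlot T ((T.length : Int) - 1) (j : Int) i)
                && pvTruthy (pvAtSlot T ((T.length : Int) - 1) (j : Int) ((T.length : Int) - 1 - i)) then
              some ((j : Int) + 1, (pvAtSlot T ((T.length : Int) - 1) (j : Int) i).getD 0,
                    (pvAtSlot T ((T.length : Int) - 1) (j : Int) ((T.length : Int) - 1 - i)).getD 0)
            else none)) := by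
      rw [Function.iterate_succ_apply', pvRow_eq T hn j acc]
    rw [hstep, ih (j+1) (by omega) (by omega)]
    simp [List.append_assoc]
-- ===== VERDICT (by name: the statement is the Claim_ definition above) =====
theorem make_fixtures_spec : Claim_equal_make_fixtures := by
  unfold Claim_equal_make_fixtures Spec_make_fixtures
  intro team_ids _
  unfold make_fixtures make_fixtures_alt
  dsimp only
  set T : List (Option Int) :=
    (if ((team_ids.map some).length % 2 == 1) = true then team_ids.map some ++ [none] else team_ids.map some) with hT
  have hTlen : T.length % 2 = 0 := by
    rw [hT]
    by_cases h : team_ids.length % 2 = 1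
    · rw [if_pos (by simp [h])]
      have : (team_ids.map some ++ [none]).length = team_ids.length + 1 := by simp
      omega
    · rw [if_neg (by simp [h])]
      have : (team_ids.map some).length = team_ids.length := by simp
      omega
  have hcases : T.length = 0 ∨ 2 ≤ T.length := by omega
  have hFL : ((PySem.List.pyRange 0 ((T.length : Int) - 1) 1).foldl
        (fun (st : List (Option Int) × List (Int × Int × Int)) rnd =>
          (pvRotA st.1, pvRowA st.1 (T.length : Int) rnd (PySem.Int.floordiv (T.length : Int) 2) st.2))
        (T, [])).2
      = (PySem.List.pyRange 0 ((T.length : Int) - 1) 1).flatMap (fun rnd =>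
          (PySem.List.pyRange 0 (PySem.Int.floordiv (T.length : Int) 2) 1).filterMap (fun i =>
            if pvTruthy (pvAtSlot T ((T.length : Int) - 1) rnd i)
                && pvTruthy (pvAtSlot T ((T.length : Int) - 1) rnd ((T.length : Int) - 1 - i)) then
              some (rnd + 1, (pvAtSlot T ((T.length : Int) - 1) rnd i).getD 0,
                    (pvAtSlot T ((T.length : Int) - 1) rnd ((T.length : Int) - 1 - i)).getD 0)
            else none)) := by
    rcases hcases with h0 | h2
    · rw [h0]
      rw [PySem.List.pyRange_one_eq_nil (by norm_num)]
      rfl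
    · have := pvLoop_eq T h2 (T.length - 1) 0 (by omega) (by omega) []
      simpa using this
  rw [hFL]
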